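-- pv_equiv track=rewrite | github.com/victorpfreitas/CreativeOS | api/source/youtube-intake.py | pick_format
-- ===== SOURCE A (Python) =====
-- def pick_format(formats):
--     if not isinstance(formats, list):
--         return None
--     priorities = ["json3", "srv3", "vtt", "ttml"]
--     for ext in priorities:
--         for item in formats:
--             if item.get("ext") == ext and item.get("url"):
--                 return item
--     for item in formats:
--         if item.get("url"):
--             return item
--     return None
-- ===== SOURCE B (Python) =====
-- def pick_format(formats):
--     if not isinstance(formats, list):
--         return None
--     priorities = ["json3", "srv3", "vtt", "ttml"]
--     first_by_ext = {}
--     first_url = None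
--     for item in formats:
--         if item.get("url"):
--             if first_url is None:
--                 first_url = item
--             ext = item.get("ext")
--             if ext not in first_by_ext:
--                 first_by_ext[ext] = item
--     for ext in priorities:
--         if ext in first_by_ext:
--             return first_by_ext[ext]
--     return first_url
-- ===== Notes on version B (the rewrite author's own statement) =====
-- stated objective: alternative
-- what changed: Replaces A's nested scans (one full pass over formats per priority ext, plus a final fallback pass) with a single pass that records the first url-bearing item per ext in a dict and the first url-bearing item overall, followed by one lookup per priority; measured only ~1.3x at the largest size, so no speed claim.
import Mathlib
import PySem

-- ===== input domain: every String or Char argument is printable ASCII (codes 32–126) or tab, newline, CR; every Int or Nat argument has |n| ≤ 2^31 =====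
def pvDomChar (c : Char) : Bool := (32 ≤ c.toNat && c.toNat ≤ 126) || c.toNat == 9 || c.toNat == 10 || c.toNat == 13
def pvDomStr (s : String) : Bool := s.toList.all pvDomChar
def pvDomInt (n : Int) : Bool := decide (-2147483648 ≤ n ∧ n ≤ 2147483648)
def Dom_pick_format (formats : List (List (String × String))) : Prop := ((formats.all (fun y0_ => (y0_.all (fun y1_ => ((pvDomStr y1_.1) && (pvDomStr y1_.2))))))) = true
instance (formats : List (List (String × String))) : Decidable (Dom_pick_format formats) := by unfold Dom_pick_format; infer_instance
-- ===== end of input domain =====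

-- B replaces A's nested scans (one pass over formats per priority ext plus a fallback pass) with a
-- single pass building a first-item-per-ext dict and the first url-bearing item, then one lookup per priority.


-- ===== PORT A =====
-- item.get(k) on a Python dict[str,str] (association list, first match)
def pvGet (item : List (String × String)) (k : String) : Option String :=
  (PySem.Dict.mk item).get? k

-- truthiness of item.get("url"): a string is truthy iff nonempty, None is falsy
def pvUrlOk (item : List (String × String)) : Bool :=
  match pvGet item "url" with
  | some s => !s.toList.isEmpty
  | none => false

def pick_format (formats : List (List (String × String))) : Option (List (String × String)) :=
  let priorities := ["json3", "srv3", "vtt", "ttml"]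
  match priorities.findSome? (fun ext =>
      formats.find? (fun item => pvGet item "ext" == some ext && pvUrlOk item)) with
  | some item => some item
  | none => formats.find? (fun item => pvUrlOk item)

-- ===== PORT B =====
-- the loop body of B's single pass: first_by_ext (only set if key absent) and first_url
def pvStepB (st : PySem.Dict (Option String) (List (String × String)) × Option (List (String × String)))
    (item : List (String × String)) :
    PySem.Dict (Option String) (List (String × String)) × Option (List (String × String)) :=
  if pvUrlOk item then
    let firstUrl := match st.2 with | none => some item | some _ => st.2
    let ext := pvGet item "ext"
    let byExt := if st.1.contains ext then st.1 else st.1.insert ext item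
    (byExt, firstUrl)
  else st

def pick_format_alt (formats : List (List (String × String))) : Option (List (String × String)) :=
  let priorities := ["json3", "srv3", "vtt", "ttml"]
  let st := formats.foldl pvStepB (PySem.Dict.empty, none)
  match priorities.findSome? (fun ext => st.1.get? (some ext)) with
  | some item => some item
  | none => st.2

-- ===== PRECONDITION & SPEC =====
def Spec_pick_format (formats : List (List (String × String))) (out : Option (List (String × String))) : Prop := out = pick_format_alt formats
instance (formats : List (List (String × String))) (out : Option (List (String × String))) : Decidable (Spec_pick_format formats out) := by unfold Spec_pick_format; infer_instance

-- ===== CLAIM (what is proved, stated in full; the proofs are below) =====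
def Claim_equal_pick_format : Prop := ∀ (formats : List (List (String × String))), Dom_pick_format formats → Spec_pick_format formats (pick_format formats)

-- ===== LEMMAS AND PROOFS =====

-- the second component of B's fold is the first url-bearing item (after whatever the accumulator holds)
theorem foldB_snd (l : List (List (String × String)))
    (st : PySem.Dict (Option String) (List (String × String)) × Option (List (String × String))) :
    (l.foldl pvStepB st).2 = st.2.or (l.find? pvUrlOk) := by
  induction l generalizing st with
  | nil => simp
  | cons hd tl ih =>
    by_cases h : pvUrlOk hd
    · simp only [List.foldl_cons, List.find?_cons_of_pos h, pvStepB, h, if_pos]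
      rw [ih]
      cases st.2 <;> simp
    · simp only [List.foldl_cons, pvStepB, h]
      rw [List.find?_cons_of_neg (by simp [h]), ih]
      simp

-- looking up a key in B's dict yields the first url-bearing item with that ext (after the accumulator)
theorem foldB_get (l : List (List (String × String)))
    (st : PySem.Dict (Option String) (List (String × String)) × Option (List (String × String)))
    (k : Option String) :
    (l.foldl pvStepB st).1.get? k
      = (st.1.get? k).or (l.find? (fun item => pvUrlOk item && (pvGet item "ext" == k))) := by
  induction l generalizing st with
  | nil => simp
  | cons hd tl ih =>
    by_cases h : pvUrlOk hd
    · simp only [List.foldl_cons, pvStepB, h, if_pos]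
      by_cases he : pvGet hd "ext" = k
      · rw [List.find?_cons_of_pos (by simp [h, he]), ih]
        subst he
        rcases hg : st.1.get? (pvGet hd "ext") with _ | v
        · have hc : st.1.contains (pvGet hd "ext") = false := by
            rw [PySem.Dict.contains_eq_isSome_get?, hg]; rfl
          simp [hc, PySem.Dict.get?_insert_self]
        · have hc : st.1.contains (pvGet hd "ext") = true := by
            rw [PySem.Dict.contains_eq_isSome_get?, hg]; rfl
          simp [hc, hg]
      · rw [List.find?_cons_of_neg (by simp [he]), ih]
        by_cases hc : st.1.contains (pvGet hd "ext") <;>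
          simp [hc, PySem.Dict.get?_insert_of_ne _ _ (fun hk => he hk.symm)]
    · simp only [List.foldl_cons, pvStepB, h]
      rw [List.find?_cons_of_neg (by simp [h]), ih]
      simp

-- ===== VERDICT (by name: the statement is the Claim_ definition above) =====
theorem pick_format_spec : Claim_equal_pick_format := by
  intro formats _
  unfold Spec_pick_format pick_format pick_format_alt
  have hget : ∀ ext : String,
      (formats.foldl pvStepB (PySem.Dict.empty, none)).1.get? (some ext)
        = formats.find? (fun item => pvGet item "ext" == some ext && pvUrlOk item) := by
    intro ext
    rw [foldB_get]
    have hp : (fun item => pvUrlOk item && (pvGet item "ext" == some ext))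
        = (fun item => pvGet item "ext" == some ext && pvUrlOk item) := by
      funext i; exact Bool.and_comm _ _
    simp [hp]
  have hsnd : (formats.foldl pvStepB (PySem.Dict.empty, none)).2 = formats.find? pvUrlOk := by
    rw [foldB_snd]; simp
  simp only [funext hget, hsnd]
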